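-- pv_equiv track=rewrite | github.com/andrewmummery/CodeWordSolver | codewordsolver/algorithm/SearchFunctions.py | letters_no_answer
-- ===== SOURCE A (Python) =====
-- def letters_no_answer(word, answers, indices_non_letters):
--     """
--     If the get_words function returns more than one world, then
--     this does not automatically decrypts any of the letters in the word.
--
--     However, if every word has the same letter in the same location,
--     then that letter can be decrypted.
--
--     This function takes in a list of words and returns two arrays.
--     The first is the numbers which have been decoded, the
--     second is the letters they correspond to.
--     """
--     l = 0
--     letters_determined = []
--     numbers_determined = []
--
--     for index in indices_non_letters:
--         for k in range(len(answers)-1):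
--             if answers[k][index] == (answers[k+1])[index]:
--                 l += 1# If two words in the list have the same letter in the same location,
--                 # then increase the couter by one.
--         if l + 1 == len(answers):# all words have the same letter in the same location.
--             letters_determined.append(answers[0][index])
--             numbers_determined.append(word[index])
--         l = 0# reset counter.
--
--     """
--         !!BUG!!
--
--         This function has a slight bug in that it can return the same letter twice
--         this is compensated for in solver_1, but should be sorted here.
--
--     """
--
--     return numbers_determined, letters_determined
-- ===== SOURCE B (Python) =====
-- def letters_no_answer(word, answers, indices_non_letters):
--     """Column-uniqueness via a set instead of a consecutive-pair counter."""
--     numbers_determined = []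
--     letters_determined = []
--     for index in indices_non_letters:
--         column = {a[index] for a in answers}
--         if answers and len(column) == 1:
--             letters_determined.append(answers[0][index])
--             numbers_determined.append(word[index])
--     return numbers_determined, letters_determined
-- ===== Notes on version B (the rewrite author's own statement) =====
-- stated objective: simpler
-- what changed: Replaces A's consecutive-pair counter with its reset bookkeeping by a direct column-uniqueness test: build the set of column characters and append exactly when answers is non-empty and the set has one element.
import Mathlib
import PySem

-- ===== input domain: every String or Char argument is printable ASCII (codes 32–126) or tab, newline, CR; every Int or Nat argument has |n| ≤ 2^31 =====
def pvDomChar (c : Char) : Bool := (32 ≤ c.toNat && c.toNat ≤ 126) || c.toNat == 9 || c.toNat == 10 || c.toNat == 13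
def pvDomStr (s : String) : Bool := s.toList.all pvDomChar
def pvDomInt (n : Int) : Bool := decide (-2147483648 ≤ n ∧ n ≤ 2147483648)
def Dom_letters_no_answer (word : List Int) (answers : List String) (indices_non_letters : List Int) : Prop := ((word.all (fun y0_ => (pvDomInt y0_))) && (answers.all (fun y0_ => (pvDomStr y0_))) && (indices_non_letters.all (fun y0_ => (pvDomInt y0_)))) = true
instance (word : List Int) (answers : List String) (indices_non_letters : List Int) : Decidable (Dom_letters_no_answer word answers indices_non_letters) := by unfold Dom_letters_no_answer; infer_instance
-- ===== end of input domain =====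

-- ===== PORT A =====
-- Port of A: per index, count equal consecutive column pairs with counter l; append when l+1 = len(answers).
def pvStepA (word : List Int) (answers : List String) (st : Int × List String × List Int) (index : Int) : Int × List String × List Int :=
  let l := (PySem.List.pyRange 0 ((answers.length : Int) - 1) 1).foldl
    (fun l k =>
      if (PySem.Str.pyGet? (PySem.List.pyGetD answers k "") index).getD ' '
         = (PySem.Str.pyGet? (PySem.List.pyGetD answers (k + 1) "") index).getD ' '
      then l + 1 else l) st.1
  if l + 1 = (answers.length : Int) then
    (0, st.2.1 ++ [String.ofList [(PySem.Str.pyGet? (PySem.List.pyGetD answers 0 "") index).getD ' ']],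
        st.2.2 ++ [PySem.List.pyGetD word index 0])
  else (0, st.2.1, st.2.2)

def letters_no_answer (word : List Int) (answers : List String) (indices_non_letters : List Int) : List Int × List String :=
  let st := indices_non_letters.foldl (pvStepA word answers) (0, [], [])
  (st.2.2, st.2.1)

-- ===== PORT B =====
-- Port of B: per index, build the set of column characters; append when answers is non-empty and the set has one element.
def pvStepB (word : List Int) (answers : List String) (st : List Int × List String) (index : Int) : List Int × List String :=
  let column := PySem.Set.ofList (answers.map (fun a => (PySem.Str.pyGet? a index).getD ' '))
  if answers ≠ [] ∧ column.length = 1 then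
    (st.1 ++ [PySem.List.pyGetD word index 0],
     st.2 ++ [String.ofList [(PySem.Str.pyGet? (PySem.List.pyGetD answers 0 "") index).getD ' ']])
  else st

def letters_no_answer_alt (word : List Int) (answers : List String) (indices_non_letters : List Int) : List Int × List String :=
  indices_non_letters.foldl (pvStepB word answers) ([], [])

-- ===== PRECONDITION & SPEC =====
-- Pre_ excludes exactly the inputs on which Python A raises IndexError: an index out of range
-- for some answer string, or (when the column agrees across the non-empty answers) for word.
def Pre_letters_no_answer (word : List Int) (answers : List String) (indices_non_letters : List Int) : Prop :=
  ∀ i ∈ indices_non_letters,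
    (∀ a ∈ answers, (PySem.Str.pyGet? a i).isSome) ∧
    ((answers ≠ [] ∧ ∀ a ∈ answers, PySem.Str.pyGet? a i = PySem.Str.pyGet? answers.headI i) →
      (PySem.List.pyGet? word i).isSome)
instance (word : List Int) (answers : List String) (indices_non_letters : List Int) : Decidable (Pre_letters_no_answer word answers indices_non_letters) := by unfold Pre_letters_no_answer; infer_instance
def pvWitness_letters_no_answer : List Int × List String × List Int := ([5, 7], ["ab", "ac"], [0, 1])

def Spec_letters_no_answer (word : List Int) (answers : List String) (indices_non_letters : List Int) (out : List Int × List String) : Prop := out = letters_no_answer_alt word answers indices_non_letters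
instance (word : List Int) (answers : List String) (indices_non_letters : List Int) (out : List Int × List String) : Decidable (Spec_letters_no_answer word answers indices_non_letters out) := by unfold Spec_letters_no_answer; infer_instance

-- ===== CLAIM (what is proved, stated in full; the proofs are below) =====
def Claim_equal_letters_no_answer : Prop := ∀ (word : List Int) (answers : List String) (indices_non_letters : List Int), Dom_letters_no_answer word answers indices_non_letters → Pre_letters_no_answer word answers indices_non_letters → Spec_letters_no_answer word answers indices_non_letters (letters_no_answer word answers indices_non_letters)

-- ===== LEMMAS AND PROOFS =====

-- getD through a map, when the default is the image of a default
theorem pv_getD_map {α β : Type} (f : α → β) (xs : List α) (k : Nat) (e : α) (d : β)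
    (hd : f e = d) : (xs.map f).getD k d = f (xs.getD k e) := by
  simp only [List.getD_eq_getElem?_getD, List.getElem?_map]
  cases h : xs[k]? <;> simp [hd]

-- adjacent pairs of a list, read off through getD-indexing over range
theorem pv_map_adj {α : Type} (cs : List α) (d : α) :
    (List.range (cs.length - 1)).map (fun k => (cs.getD k d, cs.getD (k + 1) d)) = cs.zip cs.tail := by
  induction cs with
  | nil => simp
  | cons a t ih =>
    cases t with
    | nil => simp
    | cons b t2 =>
      simp only [List.length_cons, Nat.add_sub_cancel, List.range_succ_eq_map, List.map_cons,
        List.map_map]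
      have h2 : (b :: t2).length - 1 = t2.length := by simp
      rw [h2] at ih
      simp only [List.zip_cons_cons, List.tail_cons] at ih ⊢
      refine congrArg₂ _ (by simp) ?_
      rw [← ih]
      apply List.map_congr_left
      intro k _
      simp [List.getD]

-- the consecutive-pair count saturates exactly when every element equals the head
theorem pv_chain_count (cs : List Char) :
    ((cs.zip cs.tail).countP (fun p => p.1 == p.2) + 1 = cs.length) ↔ (cs ≠ [] ∧ ∀ x ∈ cs, x = cs.headI) := by
  induction cs with
  | nil => simp
  | cons c t ih =>
    cases t with
    | nil => simp
    | cons b t2 =>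
      simp only [List.tail_cons, List.zip_cons_cons, List.countP_cons] at ih ⊢
      by_cases hcb : c = b
      · subst hcb
        simp only [beq_self_eq_true, if_pos, List.headI] at ih ⊢
        constructor
        · intro h
          have h' : (((c :: t2).zip t2).countP fun p => p.1 == p.2) + 1 = (c :: t2).length := by
            simp only [List.length_cons] at h ⊢; omega
          rcases ih.1 h' with ⟨-, hall⟩
          refine ⟨by simp, ?_⟩
          intro x hx
          rcases List.mem_cons.1 hx with h'' | h''
          · exact h''
          · exact hall x h''
        · rintro ⟨-, hall⟩
          have h' : (((c :: t2).zip t2).countP fun p => p.1 == p.2) + 1 = (c :: t2).length :=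
            ih.2 ⟨by simp, fun x hx => hall x (List.mem_cons_of_mem _ hx)⟩
          simp only [List.length_cons] at h' ⊢; omega
      · have hbeq : (c == b) = false := by simp [hcb]
        simp only [hbeq, Bool.false_eq_true, if_false]
        constructor
        · intro h
          exfalso
          have hle : (((b :: t2).zip t2).countP fun p => p.1 == p.2) ≤ t2.length := by
            calc (((b :: t2).zip t2).countP fun p => p.1 == p.2) ≤ ((b :: t2).zip t2).length :=
                  List.countP_le_length
              _ = t2.length := by simp
          simp only [List.length_cons] at h
          omega
        · rintro ⟨-, hall⟩
          have hb := hall b (by simp)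
          simp only [List.headI] at hb
          exact (hcb hb.symm).elim

-- a fold of Set.add never shrinks the set
theorem pv_foldl_add_le {α : Type} [BEq α] (t : List α) (s : PySem.Set α) :
    s.length ≤ (t.foldl PySem.Set.add s).length := by
  induction t generalizing s with
  | nil => simp
  | cons x t ih =>
    refine le_trans ?_ (ih (s.add x))
    simp only [PySem.Set.add]
    split <;> simp

theorem pv_foldl_add_singleton (t : List Char) (c : Char) :
    ((t.foldl PySem.Set.add (PySem.Set.empty.add c)).length = 1) ↔ ∀ x ∈ t, x = c := by
  induction t with
  | nil => simp [PySem.Set.add, PySem.Set.empty, PySem.Set.contains]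
  | cons x t ih =>
    simp only [List.foldl_cons]
    by_cases hxc : x = c
    · subst hxc
      have h1 : (PySem.Set.empty.add x).add x = PySem.Set.empty.add x := by
        simp [PySem.Set.add, PySem.Set.empty, PySem.Set.contains]
      rw [h1]
      simp only [ih]
      constructor
      · intro h y hy
        rcases List.mem_cons.1 hy with h' | h'
        · exact h'
        · exact h y h'
      · intro h y hy
        exact h y (List.mem_cons_of_mem _ hy)
    · have h1 : PySem.Set.empty.add c = ([c] : List Char) := by
        simp [PySem.Set.add, PySem.Set.empty, PySem.Set.contains]
      have h2 : (PySem.Set.empty.add c).add x = ([c, x] : List Char) := by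
        rw [h1]
        simp [PySem.Set.add]
        exact hxc
      rw [h2]
      have hle := pv_foldl_add_le t (([c, x] : List Char) : PySem.Set Char)
      constructor
      · intro h
        exfalso
        simp only [List.length_cons, List.length_nil] at hle
        omega
      · intro h
        exact absurd (h x (by simp)) hxc

-- a PySem set has one element exactly when the source list is non-empty with all elements equal to its head
theorem pv_set_len_one (cs : List Char) :
    ((PySem.Set.ofList cs).length = 1) ↔ (cs ≠ [] ∧ ∀ x ∈ cs, x = cs.headI) := by
  cases cs with
  | nil => simp [PySem.Set.ofList, PySem.Set.empty]
  | cons c t =>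
    simp only [PySem.Set.ofList, List.foldl_cons]
    rw [pv_foldl_add_singleton]
    simp only [List.headI, ne_eq, reduceCtorEq, not_false_iff, true_and]
    constructor
    · intro h x hx
      rcases List.mem_cons.1 hx with h' | h'
      · exact h'
      · exact h x h'
    · intro h x hx
      exact h x (List.mem_cons_of_mem _ hx)

-- A's counter condition coincides with B's set condition, for every index
theorem pv_cond_iff (answers : List String) (index : Int) :
    ((PySem.List.pyRange 0 ((answers.length : Int) - 1) 1).foldl
        (fun l k =>
          if (PySem.Str.pyGet? (PySem.List.pyGetD answers k "") index).getD ' '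
             = (PySem.Str.pyGet? (PySem.List.pyGetD answers (k + 1) "") index).getD ' '
          then l + 1 else l) (0 : Int) + 1 = (answers.length : Int))
    ↔ (answers ≠ [] ∧ (PySem.Set.ofList (answers.map (fun a => (PySem.Str.pyGet? a index).getD ' '))).length = 1) := by
  have hcol0 : (PySem.Str.pyGet? "" index).getD ' ' = ' ' := by
    simp [PySem.Str.pyGet?, PySem.Chars.pyGet?, PySem.List.pyGet?, PySem.List.pyIdx?]
  cases answers with
  | nil =>
    rw [PySem.List.pyRange_one_eq_nil (by simp)]
    simp
  | cons a t =>
    have hlen : (((a :: t).length : Int) - 1) = ((t.length : Nat) : Int) := by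
      simp
    rw [hlen, PySem.List.pyRange_zero_natCast, List.foldl_map]
    have hbody : (fun (l : Int) (k : Nat) =>
        if (PySem.Str.pyGet? (PySem.List.pyGetD (a :: t) ((k : Int)) "") index).getD ' '
           = (PySem.Str.pyGet? (PySem.List.pyGetD (a :: t) ((k : Int) + 1) "") index).getD ' '
        then l + 1 else l)
        = (fun (l : Int) (k : Nat) =>
            if (fun k : Nat => ((a :: t).map (fun s => (PySem.Str.pyGet? s index).getD ' ')).getD k ' '
                 == ((a :: t).map (fun s => (PySem.Str.pyGet? s index).getD ' ')).getD (k + 1) ' ') k = true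
            then l + 1 else l) := by
      funext l k
      have h1 : ((a :: t).map (fun s => (PySem.Str.pyGet? s index).getD ' ')).getD k ' '
          = (PySem.Str.pyGet? (PySem.List.pyGetD (a :: t) ((k : Int)) "") index).getD ' ' := by
        rw [PySem.List.pyGetD_natCast]
        exact pv_getD_map _ _ k "" ' ' hcol0
      have h2 : ((a :: t).map (fun s => (PySem.Str.pyGet? s index).getD ' ')).getD (k + 1) ' '
          = (PySem.Str.pyGet? (PySem.List.pyGetD (a :: t) ((k : Int) + 1) "") index).getD ' ' := by
        have hc : ((k : Int) + 1) = (((k + 1 : Nat) : Int)) := by push_cast; ring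
        rw [hc, PySem.List.pyGetD_natCast]
        exact pv_getD_map _ _ (k + 1) "" ' ' hcol0
      simp only [h1, h2, beq_iff_eq]
    rw [hbody, PySem.List.foldl_count_if]
    rw [show (List.countP
          (fun k : Nat => ((a :: t).map (fun s => (PySem.Str.pyGet? s index).getD ' ')).getD k ' '
            == ((a :: t).map (fun s => (PySem.Str.pyGet? s index).getD ' ')).getD (k + 1) ' ')
          (List.range t.length))
        = (List.countP (fun p => p.1 == p.2)
            ((List.range t.length).map (fun k =>
              (((a :: t).map (fun s => (PySem.Str.pyGet? s index).getD ' ')).getD k ' ',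
               ((a :: t).map (fun s => (PySem.Str.pyGet? s index).getD ' ')).getD (k + 1) ' ')))) from
      (List.countP_map (p := fun p : Char × Char => p.1 == p.2)
        (f := fun k : Nat =>
          (((a :: t).map (fun s => (PySem.Str.pyGet? s index).getD ' ')).getD k ' ',
           ((a :: t).map (fun s => (PySem.Str.pyGet? s index).getD ' ')).getD (k + 1) ' '))
        (l := List.range t.length)).symm]
    have hlen3 : t.length = ((a :: t).map (fun s => (PySem.Str.pyGet? s index).getD ' ')).length - 1 := by
      simp
    rw [hlen3, pv_map_adj]
    have hcc := pv_chain_count ((a :: t).map (fun s => (PySem.Str.pyGet? s index).getD ' '))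
    have hsl := pv_set_len_one ((a :: t).map (fun s => (PySem.Str.pyGet? s index).getD ' '))
    have hlen4 : ((a :: t).map (fun s => (PySem.Str.pyGet? s index).getD ' ')).length = (a :: t).length := by
      simp
    rw [hsl]
    constructor
    · intro h
      refine ⟨by simp, hcc.1 ?_⟩
      omega
    · rintro ⟨-, hall⟩
      have := hcc.2 hall
      omega

-- one loop iteration of A matches one loop iteration of B (with A's counter back at 0)
theorem pv_step_eq (word : List Int) (answers : List String) (i : Int) (lets : List String) (nums : List Int) :
    pvStepA word answers (0, lets, nums) i
      = (0, (pvStepB word answers (nums, lets) i).2, (pvStepB word answers (nums, lets) i).1) := by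
  unfold pvStepA pvStepB
  by_cases h : answers ≠ [] ∧ (PySem.Set.ofList (answers.map (fun a => (PySem.Str.pyGet? a i).getD ' '))).length = 1
  · rw [if_pos ((pv_cond_iff answers i).2 h), if_pos h]
  · rw [if_neg (fun hc => h ((pv_cond_iff answers i).1 hc)), if_neg h]

-- the two folds stay in lock-step
theorem pv_fold_eq (word : List Int) (answers : List String) (inds : List Int) (lets : List String) (nums : List Int) :
    inds.foldl (pvStepA word answers) (0, lets, nums)
      = (0, (inds.foldl (pvStepB word answers) (nums, lets)).2, (inds.foldl (pvStepB word answers) (nums, lets)).1) := by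
  induction inds generalizing lets nums with
  | nil => simp
  | cons i rest ih =>
    simp only [List.foldl_cons]
    rw [pv_step_eq]
    exact ih _ _

-- ===== VERDICT (by name: the statement is the Claim_ definition above) =====
theorem letters_no_answer_spec : Claim_equal_letters_no_answer := by
  intro word answers inds _ _
  unfold Spec_letters_no_answer letters_no_answer letters_no_answer_alt
  rw [pv_fold_eq]
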